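-- pv_equiv track=rewrite | github.com/oleksandr-medviediev/campus_2018_python | Taras_Martyniuk/2/determine_alergies.py | determine_allergies
-- ===== SOURCE A (Python) =====
-- scores = {
--     1 : 'eggs',
--     2 : 'peanuts',
--     4 : 'shellfish',
--     8 : 'strawberries',
--     16 : 'tomatoes',
--     32 : 'chocolate',
--     64 : 'pollen',
--     128 : 'cats'
-- }
--
-- def determine_allergies(score):
--
--     """
--         :param score: int
--         :returns: list of all allergies that fit into alergy score
--     """
--
--     score = score % 256
--     powers_of_2 = [2 ** pow for pow in range(8)]
--     powers_of_2.reverse()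
--
--     find = lambda pred, iterable : next((x for x in iterable if pred(x)), None)
--     res = []
--
--     while score > 0:
--         largest_afforable_score = find(lambda x: x <= score, powers_of_2)
--         res.append(scores[largest_afforable_score])
--         score -= largest_afforable_score
--
--     return res
-- ===== SOURCE B (Python) =====
-- BIT_NAMES = (
--     (128, 'cats'),
--     (64, 'pollen'),
--     (32, 'chocolate'),
--     (16, 'tomatoes'),
--     (8, 'strawberries'),
--     (4, 'shellfish'),
--     (2, 'peanuts'),
--     (1, 'eggs'),
-- )
--
-- def determine_allergies(score):
--     score %= 256
--     return [name for bit, name in BIT_NAMES if score & bit]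
-- ===== Notes on version B (the rewrite author's own statement) =====
-- stated objective: simpler
-- what changed: Replaced A's while-loop that repeatedly rescans the list of powers to find and subtract the largest affordable one with a single filtered pass over a (bit, name) table using a bitwise-AND test.
import Mathlib
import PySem

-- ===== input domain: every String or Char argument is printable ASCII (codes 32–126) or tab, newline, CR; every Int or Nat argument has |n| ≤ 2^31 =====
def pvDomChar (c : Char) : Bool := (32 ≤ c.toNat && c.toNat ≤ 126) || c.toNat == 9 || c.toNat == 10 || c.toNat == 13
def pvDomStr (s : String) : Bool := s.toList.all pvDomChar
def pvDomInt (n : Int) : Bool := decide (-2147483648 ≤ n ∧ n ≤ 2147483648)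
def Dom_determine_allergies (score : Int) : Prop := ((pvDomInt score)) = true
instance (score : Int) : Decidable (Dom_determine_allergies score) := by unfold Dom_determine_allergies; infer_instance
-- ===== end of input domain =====

-- B replaces A's while-loop (rescan the powers list for the largest affordable power, subtract it)
-- with a single filtered pass over a (bit, name) table using a bitwise-AND test; objective: simpler.

-- ===== PORT A =====
-- scores = {1:'eggs', …, 128:'cats'}
def pvScores : PySem.Dict Int String :=
  ((((((((PySem.Dict.empty.insert 1 "eggs").insert 2 "peanuts").insert 4 "shellfish").insert
      8 "strawberries").insert 16 "tomatoes").insert 32 "chocolate").insert 64 "pollen").insert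
      128 "cats")

-- powers_of_2 = [2 ** pow for pow in range(8)]; powers_of_2.reverse()
def pvPowersOf2 : List Int :=
  ((PySem.List.pyRange 0 8 1).map (fun p => (2 : Int) ^ p.toNat)).reverse

-- the while loop of A; find = next((x for x in iterable if pred(x)), None) is List.find?.
-- Structural recursion on a fuel counter; fuel = score.toNat suffices since each
-- iteration subtracts a power ≥ 1 from score (the fuel only makes the loop total).
def pvALoop : Nat → Int → List String
  | 0, _ => []
  | fuel + 1, score =>
    if 0 < score then
      match pvPowersOf2.find? (fun x => decide (x ≤ score)) with
      | some p => pvScores.getD p "" :: pvALoop fuel (score - p)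
      | none => []   -- unreachable: 1 ≤ score always affords 1 (Python's find never returns None here)
    else []

def determine_allergies (score : Int) : List String :=
  pvALoop (PySem.Int.mod score 256).toNat (PySem.Int.mod score 256)

-- ===== PORT B =====
def pvBitNames : List (Int × String) :=
  [(128, "cats"), (64, "pollen"), (32, "chocolate"), (16, "tomatoes"),
   (8, "strawberries"), (4, "shellfish"), (2, "peanuts"), (1, "eggs")]

def determine_allergies_alt (score : Int) : List String :=
  let s := PySem.Int.mod score 256
  (pvBitNames.filter (fun p => PySem.Int.band s p.1 != 0)).map Prod.snd

-- ===== PRECONDITION & SPEC =====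
def Spec_determine_allergies (score : Int) (out : List String) : Prop := out = determine_allergies_alt score
instance (score : Int) (out : List String) : Decidable (Spec_determine_allergies score out) := by unfold Spec_determine_allergies; infer_instance

-- ===== CLAIM (what is proved, stated in full; the proofs are below) =====
def Claim_equal_determine_allergies : Prop := ∀ (score : Int), Dom_determine_allergies score → Spec_determine_allergies score (determine_allergies score)

-- ===== LEMMAS AND PROOFS =====

-- both sides depend only on score % 256 ∈ [0, 256); check all residues by kernel evaluation
set_option maxRecDepth 8192 in
theorem pvResidue_eq : ∀ n : Fin 256,
    pvALoop (n : Nat) ((n : Nat) : Int) =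
      (pvBitNames.filter (fun p => PySem.Int.band ((n : Nat) : Int) p.1 != 0)).map Prod.snd := by
  decide

-- ===== VERDICT (by name: the statement is the Claim_ definition above) =====
theorem determine_allergies_spec : Claim_equal_determine_allergies := by
  intro score _
  unfold Spec_determine_allergies determine_allergies determine_allergies_alt
  have h0 : 0 ≤ PySem.Int.mod score 256 := PySem.Int.mod_nonneg score (by norm_num)
  have h1 : PySem.Int.mod score 256 < 256 := PySem.Int.mod_lt score (by norm_num)
  have hcast : (((PySem.Int.mod score 256).toNat : Nat) : Int) = PySem.Int.mod score 256 := by omega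
  have := pvResidue_eq ⟨(PySem.Int.mod score 256).toNat, by omega⟩
  simp only [hcast] at this
  simpa using this
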